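-- pv_equiv track=rewrite | github.com/lovelysi0113/Algorithm_Problems | Programmers/LEVEL_2/60058-괄호_변환.py | chg_str_order
-- ===== SOURCE A (Python) =====
-- def chk_str_right(u):
--     # 올바른 괄호 문자열인지 확인하는 함수
--     chk_open = 0
--     chk_close = 0
--     for chk in u:
--         if chk == '(':
--             chk_open += 1
--         elif chk == ')':
--             chk_close += 1
--         if chk_open < chk_close:
--             return False
--     return True
--
-- def chg_str_order(w):
--     # 올바른 괄호 문자열로 변환하는 함수
--     # 빈 문자열 확인
--     if w == '':
--         return ''
--     u = ''
--     v = ''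
--     # u, v 분리
--     chk_open = 0
--     chk_close = 0
--     for idx, value in enumerate(w):
--         if value == '(':
--             chk_open += 1
--         elif value == ')':
--             chk_close += 1
--         if chk_open == chk_close:
--             u = w[:idx+1]
--             if idx+2 < len(w):
--                 v = w[idx+1:]
--             break
--     # u가 올바른 괄호 문자열인지 확인
--     str_right = chk_str_right(u)
--     # 문자열 u가 "올바른 괄호 문자열" 이라면
--     if str_right:
--         newstr = u + chg_str_order(v)
--     # 문자열 u가 "올바른 괄호 문자열"이 아니라면
--     else:
--         newu = u[1:len(u)-1]
--         chgu = ''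
--         for value in newu:
--             if value == '(':
--                 chgu += ')'
--             elif value == ')':
--                 chgu += '('
--         newstr = '(' + chg_str_order(v) + ')' + chgu
--     return newstr
-- ===== SOURCE B (Python) =====
-- def chg_str_order(w):
--     # Single pass over fixed indices: find each balance point and its validity
--     # in one scan, assemble output iteratively with prefix/suffix lists
--     # (no recursion, no repeated slicing of the remainder).
--     n = len(w)
--     pre = []
--     suf = []
--     start = 0
--     while start < n:
--         bal = 0
--         right = True
--         end = -1
--         for i in range(start, n):
--             c = w[i]
--             if c == '(':
--                 bal += 1
--             elif c == ')':
--                 bal -= 1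
--                 if bal < 0:
--                     right = False
--             if bal == 0:
--                 end = i
--                 break
--         if end == -1:
--             break
--         if right:
--             pre.append(w[start:end + 1])
--         else:
--             pre.append('(')
--             suf.append(')' + ''.join(
--                 ')' if c == '(' else '(' if c == ')' else ''
--                 for c in w[start + 1:end]))
--         if end + 2 >= n:
--             break
--         start = end + 1
--     pre.extend(reversed(suf))
--     return ''.join(pre)
-- ===== Notes on version B (the rewrite author's own statement) =====
-- stated objective: faster
-- what changed: Replaces the slicing recursion (which re-scans each segment with chk_str_right and rebuilds strings by concatenation) with a single index-based loop over the fixed string that finds each balance point and its validity in one scan and assembles the result from prefix/suffix segment lists joined once at the end.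
import Mathlib
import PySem

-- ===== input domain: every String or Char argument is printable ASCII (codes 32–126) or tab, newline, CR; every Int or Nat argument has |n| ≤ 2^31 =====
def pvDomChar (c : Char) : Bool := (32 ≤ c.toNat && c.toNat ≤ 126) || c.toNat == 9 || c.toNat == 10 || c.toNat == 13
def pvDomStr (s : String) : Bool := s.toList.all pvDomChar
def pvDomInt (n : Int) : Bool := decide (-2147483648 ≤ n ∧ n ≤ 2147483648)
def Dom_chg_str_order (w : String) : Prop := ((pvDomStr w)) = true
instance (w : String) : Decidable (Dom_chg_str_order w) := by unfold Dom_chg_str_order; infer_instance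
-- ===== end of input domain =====

-- B replaces A's slicing recursion (with its separate chk_str_right re-scan and string
-- concatenation) by one index-based loop over the fixed string that finds each balance
-- point and its validity in a single scan and joins prefix/suffix segment lists once.

-- ===== PORT A =====

-- A's enumerate loop that finds the first index where chk_open == chk_close
-- (returns the index relative to the start of the segment).
def findSplitA : List Char → Int → Int → Option Nat
  | [], _, _ => none
  | c :: rest, co, cc =>
    let co2 := if c = '(' then co + 1 else co
    let cc2 := if c = ')' then cc + 1 else cc
    if co2 = cc2 then some 0 else (findSplitA rest co2 cc2).map (· + 1)

-- A's chk_str_right: False as soon as chk_open < chk_close.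
def chkStrRightA : List Char → Int → Int → Bool
  | [], _, _ => true
  | c :: rest, co, cc =>
    let co2 := if c = '(' then co + 1 else co
    let cc2 := if c = ')' then cc + 1 else cc
    if co2 < cc2 then false else chkStrRightA rest co2 cc2

-- A's chgu loop: '(' ↦ ')', ')' ↦ '(', other characters skipped.
def flipA : List Char → List Char
  | [] => []
  | c :: rest =>
    if c = '(' then ')' :: flipA rest
    else if c = ')' then '(' :: flipA rest
    else flipA rest

-- A's recursion on the current string w. The fuel argument is only a structural
-- totality guard: each recursive call is on a strictly shorter list, so any
-- fuel > w.length is enough and the 0 case is never reached from the entry point.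
def chgA : Nat → List Char → List Char
  | 0, _ => []
  | fuel + 1, w =>
    if w = [] then []
    else
      match findSplitA w 0 0 with
      | none => [] ++ chgA fuel []        -- u and v were never assigned: u = '' is "right", v = ''
      | some k =>
        let u := w.take (k + 1)
        let v := if k + 2 < w.length then w.drop (k + 1) else []
        if chkStrRightA u 0 0 then u ++ chgA fuel v
        else
          let newu := (u.drop 1).take (u.length - 2)   -- u[1:len(u)-1]
          '(' :: chgA fuel v ++ ')' :: flipA newu

def chg_str_order (w : String) : String :=
  String.ofList (chgA (w.toList.length + 1) w.toList)

-- ===== PORT B =====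

-- B's inner for-loop over range(start, n): one scan that finds the first index where
-- the running balance hits 0 and whether the balance ever went negative on the way.
-- It walks the suffix w[start:] as a list, keeping the absolute index i (so the head
-- of the list is exactly w[i], the character B's loop reads).
def scanB : List Char → Nat → Int → Bool → Option (Nat × Bool)
  | [], _, _, _ => none
  | c :: rest, i, bal, right =>
    let bal2 := if c = '(' then bal + 1 else if c = ')' then bal - 1 else bal
    let right2 := if c = ')' ∧ bal2 < 0 then false else right
    if bal2 = 0 then some (i, right2) else scanB rest (i + 1) bal2 right2

-- B's generator expression flipping the parentheses of a segment.
def flipB (xs : List Char) : List Char :=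
  xs.flatMap (fun c => if c = '(' then [')'] else if c = ')' then ['('] else [])

-- B's while-loop with its prefix/suffix accumulators (lists of segments, joined once).
-- Fuel is again only a structural totality guard: start strictly increases, so any
-- fuel > w.length suffices and the 0 case is never reached from the entry point.
def loopB (w : List Char) : Nat → Nat → List (List Char) → List (List Char) → List Char
  | 0, _, pre, suf => (pre ++ suf.reverse).flatten
  | fuel + 1, start, pre, suf =>
    if start < w.length then
      match scanB (w.drop start) start 0 true with
      | none => (pre ++ suf.reverse).flatten
      | some (e, right) =>
        let pre2 := if right then pre ++ [(w.drop start).take (e + 1 - start)]   -- w[start:end+1]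
                    else pre ++ [['(']]
        let suf2 := if right then suf
                    else suf ++ [')' :: flipB ((w.drop (start + 1)).take (e - (start + 1)))]  -- w[start+1:end]
        if e + 2 ≥ w.length then (pre2 ++ suf2.reverse).flatten
        else loopB w fuel (e + 1) pre2 suf2
    else (pre ++ suf.reverse).flatten

def chg_str_order_alt (w : String) : String :=
  String.ofList (loopB w.toList (w.toList.length + 1) 0 [] [])

-- ===== PRECONDITION & SPEC =====
def Spec_chg_str_order (w : String) (out : String) : Prop := out = chg_str_order_alt w
instance (w : String) (out : String) : Decidable (Spec_chg_str_order w out) := by unfold Spec_chg_str_order; infer_instance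

-- ===== CLAIM (what is proved, stated in full; the proofs are below) =====
def Claim_equal_chg_str_order : Prop := ∀ (w : String), Dom_chg_str_order w → Spec_chg_str_order w (chg_str_order w)

-- ===== LEMMAS AND PROOFS =====

theorem chgA_nil (fuel : Nat) : chgA fuel [] = [] := by cases fuel <;> simp [chgA]

theorem flipB_eq_flipA (xs : List Char) : flipB xs = flipA xs := by
  induction xs with
  | nil => rfl
  | cons c rest ih =>
      simp only [flipB, List.flatMap_cons, flipA] at *
      split_ifs <;> simp_all

theorem scanB_some (s : List Char) :
    ∀ i bal r e rt, scanB s i bal r = some (e, rt) → i ≤ e ∧ e < i + s.length := by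
  induction s with
  | nil => intro i bal r e rt h; rw [scanB] at h; exact absurd h (by simp)
  | cons c rest ih =>
      intro i bal r e rt h
      rw [scanB] at h
      generalize (if c = '(' then bal + 1 else if c = ')' then bal - 1 else bal) = bal2 at h
      generalize (if c = ')' ∧ bal2 < 0 then false else r) = r2 at h
      split at h
      · simp only [Option.some.injEq, Prod.mk.injEq] at h
        simp; omega
      · have := ih (i + 1) bal2 r2 e rt h
        simp; omega

-- B's one scan computes A's split index (shifted by i) together with
-- A's chk_str_right verdict on the segment up to the split.
theorem scan_agree (s : List Char) :
    ∀ i co cc r, (r = true → 0 ≤ co - cc) →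
    scanB s i (co - cc) r =
      (findSplitA s co cc).map
        (fun k => (i + k, r && chkStrRightA (s.take (k + 1)) co cc)) := by
  induction s with
  | nil => intro i co cc r _; simp [scanB, findSplitA]
  | cons c rest ih =>
      intro i co cc r hr
      set co2 := if c = '(' then co + 1 else co with hco2
      set cc2 := if c = ')' then cc + 1 else cc with hcc2
      have hbal : (if c = '(' then (co - cc) + 1 else if c = ')' then (co - cc) - 1
          else (co - cc)) = co2 - cc2 := by
        rw [hco2, hcc2]; split_ifs <;> simp_all <;> omega
      rw [scanB]
      simp only [hbal]
      simp only [findSplitA]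
      rw [← hco2, ← hcc2]
      by_cases hz : co2 = cc2
      · have hb0 : co2 - cc2 = 0 := by omega
        simp [hz, List.take_succ_cons, chkStrRightA, ← hco2, ← hcc2]
      · have hbne : ¬ (co2 - cc2 = 0) := by omega
        rw [if_neg hbne, if_neg hz]
        have hr2 : (if c = ')' ∧ co2 - cc2 < 0 then false else r) = true → 0 ≤ co2 - cc2 := by
          intro h
          split at h
          · exact absurd h (by simp)
          · rename_i hcnd
            have h0 : 0 ≤ co - cc := hr h
            by_cases hcq : c = ')'
            · have : ¬ co2 - cc2 < 0 := fun hneg => hcnd ⟨hcq, hneg⟩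
              omega
            · have hcceq : cc2 = cc := by rw [hcc2, if_neg hcq]
              have : co ≤ co2 := by rw [hco2]; split_ifs <;> omega
              omega
        rw [ih (i + 1) co2 cc2 _ hr2]
        cases hfs : findSplitA rest co2 cc2 with
        | none => simp
        | some k =>
          simp only [Option.map_some, Option.some.injEq]
          have htk : (c :: rest).take (k + 1 + 1) = c :: rest.take (k + 1) :=
            List.take_succ_cons
          rw [htk]
          have hchk : chkStrRightA (c :: rest.take (k + 1)) co cc =
              (if co2 < cc2 then false else chkStrRightA (rest.take (k + 1)) co2 cc2) := by
            simp only [chkStrRightA, ← hco2, ← hcc2]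
          rw [hchk]
          have hbool : ((if c = ')' ∧ co2 - cc2 < 0 then false else r) &&
              chkStrRightA (rest.take (k + 1)) co2 cc2) =
              (r && (if co2 < cc2 then false else
                chkStrRightA (rest.take (k + 1)) co2 cc2)) := by
            cases r with
            | false => split_ifs <;> simp
            | true =>
              have h0 : 0 ≤ co - cc := hr rfl
              by_cases hlt2 : co2 < cc2
              · have hcq : c = ')' := by
                  by_contra hcq
                  have hcceq : cc2 = cc := by rw [hcc2, if_neg hcq]
                  have : co ≤ co2 := by rw [hco2]; split_ifs <;> omega
                  omega
                simp [hlt2, hcq, show co2 - cc2 < 0 by omega]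
              · have hcnd : ¬ (c = ')' ∧ co2 - cc2 < 0) := by
                  rintro ⟨_, hb⟩; omega
                simp [hlt2]
          rw [hbool, show i + 1 + k = i + (k + 1) by omega]

-- The loop invariant: with enough fuel, B's loop produces exactly the segments of
-- A's recursion on the remaining suffix, around the accumulated prefix and suffix.
theorem loopB_eq (w : List Char) :
    ∀ fuel start pre suf, w.length - start < fuel →
    loopB w fuel start pre suf =
      pre.flatten ++ chgA fuel (w.drop start) ++ suf.reverse.flatten := by
  intro fuel
  induction fuel with
  | zero => intro start pre suf hfu; omega
  | succ fuel ih =>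
    intro start pre suf hfu
    by_cases h : start < w.length
    case neg =>
      rw [loopB, List.drop_eq_nil_of_le (by omega)]
      simp [h, chgA]
    case pos =>
      have hdne : w.drop start ≠ [] := by
        intro hnil
        have := congrArg List.length hnil
        simp at this
        omega
      have hag := scan_agree (w.drop start) start 0 0 true (by norm_num)
      norm_num at hag
      rw [loopB]
      simp only [if_pos h]
      cases hs : scanB (w.drop start) start 0 true with
      | none =>
        rw [hs] at hag
        have hfs : findSplitA (w.drop start) 0 0 = none := by
          cases hfs' : findSplitA (w.drop start) 0 0 with
          | none => rfl
          | some k => rw [hfs'] at hag; simp at hag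
        rw [chgA]
        simp [hdne, hfs, chgA_nil]
      | some er =>
        obtain ⟨e, right⟩ := er
        have hb := scanB_some (w.drop start) start 0 true e right hs
        rw [List.length_drop] at hb
        rw [hs] at hag
        cases hfs : findSplitA (w.drop start) 0 0 with
        | none => rw [hfs] at hag; simp at hag
        | some k =>
          rw [hfs] at hag
          simp only [Option.map_some, Option.some.injEq, Prod.mk.injEq] at hag
          obtain ⟨hke, hrt⟩ := hag
          have hklt : k + 1 ≤ w.length - start := by omega
          have hlendrop : (w.drop start).length = w.length - start := List.length_drop
          -- A's v equals what B recurses on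
          have hvv : (if k + 2 < (w.drop start).length then (w.drop start).drop (k + 1) else [])
              = (if e + 2 ≥ w.length then ([] : List Char) else w.drop (e + 1)) := by
            rw [hlendrop, List.drop_drop]
            rcases Nat.lt_or_ge (k + 2) (w.length - start) with hcmp | hcmp
            · rw [if_pos hcmp, if_neg (by omega), show start + (k + 1) = e + 1 by omega]
            · rw [if_neg (by omega), if_pos (by omega)]
          -- the segment slices agree
          have hu : (w.drop start).take (e + 1 - start) = (w.drop start).take (k + 1) := by
            rw [show e + 1 - start = k + 1 by omega]
          have hulen : ((w.drop start).take (k + 1)).length = k + 1 := by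
            simp [hlendrop]; omega
          have hmid : (((w.drop start).take (k + 1)).drop 1).take
                (((w.drop start).take (k + 1)).length - 2)
              = (w.drop (start + 1)).take (e - (start + 1)) := by
            rw [hulen, List.drop_take, List.drop_drop, List.take_take]
            rw [show start + 1 = 1 + start by omega,
              show min (k + 1 - 2) (k + 1 - 1) = e - (1 + start) by omega]
          rw [chgA]
          simp only [if_neg hdne, hfs]
          rw [hvv, ← hrt]
          rcases Nat.lt_or_ge e.succ.succ w.length with hlt2 | hge
          · have hc : ¬ e + 2 ≥ w.length := by omega
            simp only [if_neg hc]
            cases right with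
            | true =>
              rw [ih (e + 1) _ _ (by omega)]
              simp [List.flatten_append, hu]
            | false =>
              rw [hmid, flipB_eq_flipA, ih (e + 1) _ _ (by omega)]
              simp [List.flatten_append]
          · have hc : e + 2 ≥ w.length := by omega
            simp only [if_pos hc]
            rw [chgA_nil]
            cases right with
            | true => simp [List.flatten_append, hu]
            | false =>
              rw [hmid, flipB_eq_flipA]
              simp [List.flatten_append]

-- ===== VERDICT (by name: the statement is the Claim_ definition above) =====
theorem chg_str_order_spec : Claim_equal_chg_str_order := by
  intro w _
  unfold Spec_chg_str_order chg_str_order chg_str_order_alt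
  rw [loopB_eq w.toList (w.toList.length + 1) 0 [] [] (by omega)]
  simp
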